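-- pv_equiv track=rewrite | github.com/WoutGrovenPXL/IT-Essentials | 6_strings/Opgaven/opgave6.10.py | string_vervanger
-- ===== SOURCE A (Python) =====
-- def string_vervanger(string):
--     nieuwe_string = ""
--
--     for letter in string:
--         if (ord(letter) < 97 or ord(letter) > 122):
--             nieuwe_string += " "
--         else:
--             nieuwe_string += letter
--
--     return nieuwe_string
-- ===== SOURCE B (Python) =====
-- import re
--
-- def string_vervanger(string):
--     return re.sub('[^a-z]', ' ', string)
-- ===== Notes on version B (the rewrite author's own statement) =====
-- stated objective: idiomatic
-- what changed: Replaced the explicit per-character ord-comparison accumulation loop with a single regex substitution that maps every character outside lowercase a-z to a space.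
import Mathlib
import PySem

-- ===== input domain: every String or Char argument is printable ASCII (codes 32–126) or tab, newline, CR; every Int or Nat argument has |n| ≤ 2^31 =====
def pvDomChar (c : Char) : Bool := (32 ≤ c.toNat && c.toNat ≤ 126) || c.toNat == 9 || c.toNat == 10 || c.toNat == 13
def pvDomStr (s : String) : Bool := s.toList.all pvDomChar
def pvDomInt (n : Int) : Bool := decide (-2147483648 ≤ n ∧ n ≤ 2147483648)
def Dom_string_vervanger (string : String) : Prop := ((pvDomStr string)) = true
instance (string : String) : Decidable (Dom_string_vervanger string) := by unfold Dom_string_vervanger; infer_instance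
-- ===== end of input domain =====

-- B replaces A's character-by-character accumulation loop with a single regex substitution
-- (ported as one map over the characters); objective: idiomatic.

-- ===== PORT A =====
-- A: accumulate a new string, appending " " for each char with ord < 97 or > 122, else the char.
def string_vervanger (string : String) : String :=
  String.mk (string.toList.foldl
    (fun nieuwe_string letter =>
      if letter.toNat < 97 ∨ letter.toNat > 122 then nieuwe_string ++ [' ']
      else nieuwe_string ++ [letter]) [])

-- ===== PORT B =====
-- B: re.sub('[^a-z]', ' ', string) — every char outside [a-z] becomes ' ' (ported as a map).
def string_vervanger_alt (string : String) : String :=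
  String.mk (string.toList.map (fun c => if 97 ≤ c.toNat ∧ c.toNat ≤ 122 then c else ' '))

-- ===== PRECONDITION & SPEC =====
def Spec_string_vervanger (string : String) (out : String) : Prop := out = string_vervanger_alt string
instance (string : String) (out : String) : Decidable (Spec_string_vervanger string out) := by unfold Spec_string_vervanger; infer_instance

-- ===== CLAIM (what is proved, stated in full; the proofs are below) =====
def Claim_equal_string_vervanger : Prop := ∀ (string : String), Dom_string_vervanger string → Spec_string_vervanger string (string_vervanger string)

-- ===== LEMMAS AND PROOFS =====
theorem string_vervanger_foldl_eq_map (l acc : List Char) :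
    l.foldl (fun s c => if c.toNat < 97 ∨ c.toNat > 122 then s ++ [' '] else s ++ [c]) acc
      = acc ++ l.map (fun c => if 97 ≤ c.toNat ∧ c.toNat ≤ 122 then c else ' ') := by
  induction l generalizing acc with
  | nil => simp
  | cons c t ih =>
    simp only [List.foldl, List.map, ih]
    split_ifs with h1 h2 <;> simp_all <;> omega

-- ===== VERDICT (by name: the statement is the Claim_ definition above) =====
theorem string_vervanger_spec : Claim_equal_string_vervanger := by
  intro string _
  unfold Spec_string_vervanger string_vervanger string_vervanger_alt
  rw [string_vervanger_foldl_eq_map]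
  simp
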